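-- pv_equiv track=rewrite | github.com/omerlefaruk/CasareRPA | src/casare_rpa/presentation/canvas/ui/widgets/selector_input_widget.py | is_selector_property
-- ===== SOURCE A (Python) =====
-- SELECTOR_PROPERTY_NAMES = {
--     "selector",
--     "xpath",
--     "css_selector",
--     "css",
--     "target_selector",
--     "element_selector",
--     "wait_selector",
--     "anchor_selector",
--     "parent_selector",
--     "container_selector",
--     "locator",
-- }
--
-- def is_selector_property(name: str) -> bool:
--     """
--     Check if a property name is a selector-type property.
--
--     Args:
--         name: Property name
--
--     Returns:
--         True if this is a selector property that should show the explorer button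
--     """
--     lower_name = name.lower()
--
--     # Direct match
--     if lower_name in SELECTOR_PROPERTY_NAMES:
--         return True
--
--     # Suffix match (e.g., "close_button_selector")
--     for selector_name in SELECTOR_PROPERTY_NAMES:
--         if lower_name.endswith(f"_{selector_name}"):
--             return True
--
--     return False
-- ===== SOURCE B (Python) =====
-- SELECTOR_PROPERTY_NAMES = {
--     "selector",
--     "xpath",
--     "css_selector",
--     "css",
--     "target_selector",
--     "element_selector",
--     "wait_selector",
--     "anchor_selector",
--     "parent_selector",
--     "container_selector",
--     "locator",
-- }
--
--
-- def is_selector_property(name: str) -> bool: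
--     lower_name = name.lower()
--     if lower_name in SELECTOR_PROPERTY_NAMES:
--         return True
--     # Split off the trailing underscore token once; every multi-word set entry
--     # ends in a token that is itself a set member, so one membership test suffices.
--     _, sep, last = lower_name.rpartition("_")
--     return bool(sep) and last in SELECTOR_PROPERTY_NAMES
-- ===== Notes on version B (the rewrite author's own statement) =====
-- stated objective: simpler
-- what changed: B replaces A's loop over all 11 set entries (each doing an endswith suffix check) by splitting off the trailing underscore token once with rpartition and doing a single set-membership test; this is exact because every multi-word set entry ends in a token that is itself a set member.
import Mathlib
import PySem

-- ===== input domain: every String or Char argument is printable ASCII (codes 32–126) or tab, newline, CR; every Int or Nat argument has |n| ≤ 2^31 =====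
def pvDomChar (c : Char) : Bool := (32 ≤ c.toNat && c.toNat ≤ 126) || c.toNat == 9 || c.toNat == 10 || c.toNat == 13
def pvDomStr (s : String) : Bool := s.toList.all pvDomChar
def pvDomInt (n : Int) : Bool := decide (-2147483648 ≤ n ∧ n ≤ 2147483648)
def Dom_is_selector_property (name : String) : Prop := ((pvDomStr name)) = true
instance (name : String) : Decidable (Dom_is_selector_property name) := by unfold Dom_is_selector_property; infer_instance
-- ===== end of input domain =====

-- B replaces A's loop over all set entries (each doing an endswith check) by splitting off
-- the trailing '_'-token once and doing a single membership test (objective: simpler).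

-- ===== PORT A =====
-- the module-level constant SELECTOR_PROPERTY_NAMES (a set of distinct strings, insertion order)
def selectorPropertyNames : List String :=
  ["selector", "xpath", "css_selector", "css", "target_selector", "element_selector",
   "wait_selector", "anchor_selector", "parent_selector", "container_selector", "locator"]

def is_selector_property (name : String) : Bool :=
  let lowerName := PySem.Str.lower name
  if selectorPropertyNames.contains lowerName then true
  else if selectorPropertyNames.any (fun s => PySem.Str.endswith lowerName ("_" ++ s)) then true
  else false

-- ===== PORT B =====
-- hand port (exact) of the two fields of lower_name.rpartition("_") that Source B uses:
-- whether the separator was found, and the characters after the LAST '_'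
def rpartitionUnderscore (cs : List Char) : Bool × List Char :=
  let r := cs.reverse
  (r.contains '_', (r.takeWhile (fun c => c ≠ '_')).reverse)

def is_selector_property_alt (name : String) : Bool :=
  let lowerName := PySem.Str.lower name
  if selectorPropertyNames.contains lowerName then true
  else
    let (sep, last) := rpartitionUnderscore lowerName.toList
    sep && selectorPropertyNames.contains (String.ofList last)

-- ===== PRECONDITION & SPEC =====
def Spec_is_selector_property (name : String) (out : Bool) : Prop := out = is_selector_property_alt name
instance (name : String) (out : Bool) : Decidable (Spec_is_selector_property name out) := by unfold Spec_is_selector_property; infer_instance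

-- ===== CLAIM (what is proved, stated in full; the proofs are below) =====
def Claim_equal_is_selector_property : Prop := ∀ (name : String), Dom_is_selector_property name → Spec_is_selector_property name (is_selector_property name)

-- ===== LEMMAS AND PROOFS =====

-- takeWhile over a prefix on which the predicate holds stops exactly at the appended failing element
lemma takeWhile_clean_append (p : Char → Bool) (a b : List Char)
    (h : ∀ c ∈ a, p c) (hb : p '_' = false) :
    (a ++ '_'::b).takeWhile p = a := by
  induction a with
  | nil => simp [hb]
  | cons x xs ih => simp_all

-- if '_'::t is a suffix of cs and t is '_'-free, then the reversed-takeWhile token of cs is t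
lemma tail_token (cs t : List Char) (ht : '_' ∉ t) (h : ('_'::t) <:+ cs) :
    cs.reverse.contains '_' = true ∧
      (cs.reverse.takeWhile (fun c => c ≠ '_')).reverse = t := by
  obtain ⟨h', rfl⟩ := h
  have hrev : (h' ++ '_'::t).reverse = t.reverse ++ '_'::h'.reverse := by
    simp [List.reverse_append]
  constructor
  · rw [hrev]
    exact List.elem_eq_true_of_mem (by simp)
  · rw [hrev, takeWhile_clean_append]
    · simp
    · intro c hc
      simp only [decide_eq_true_eq]
      intro hc'
      exact ht (by simpa [hc'] using List.mem_reverse.mp hc)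
    · simp

-- one suffix-match case of A's loop: the entry s ends in the '_'-free token t, which pins B's token
lemma case_step (l : String) (s t : String) (ht : '_' ∉ t.toList)
    (hsub : ('_'::t.toList) <:+ ('_'::s.toList))
    (hend : PySem.Str.endswith l ("_" ++ s) = true) :
    l.toList.reverse.contains '_' = true ∧
      (l.toList.reverse.takeWhile (fun c => c ≠ '_')).reverse = t.toList := by
  have hsuf : ('_'::s.toList) <:+ l.toList := by
    have := (PySem.Chars.endswith_iff (s := l.toList) (p := ("_" ++ s).toList)).mp (by simpa using hend)
    simpa [String.toList_append] using this
  exact tail_token _ _ ht (hsub.trans hsuf)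

-- A's suffix loop equals B's sep-and-token test (for every string, lowered or not)
lemma loop_eq_token (l : String) :
    (selectorPropertyNames.any fun s => PySem.Str.endswith l ("_" ++ s)) =
      (l.toList.reverse.contains '_' &&
        selectorPropertyNames.contains
          (String.ofList ((l.toList.reverse.takeWhile (fun c => c ≠ '_')).reverse))) := by
  rw [Bool.eq_iff_iff]
  constructor
  · intro h
    obtain ⟨s, hs, hend⟩ := List.any_eq_true.mp h
    have hmem : s = "selector" ∨ s = "xpath" ∨ s = "css_selector" ∨ s = "css" ∨
        s = "target_selector" ∨ s = "element_selector" ∨ s = "wait_selector" ∨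
        s = "anchor_selector" ∨ s = "parent_selector" ∨ s = "container_selector" ∨
        s = "locator" := by simpa [selectorPropertyNames] using hs
    -- in each case the entry's trailing token t is itself a set member
    rcases hmem with rfl|rfl|rfl|rfl|rfl|rfl|rfl|rfl|rfl|rfl|rfl
    case _ => obtain ⟨h1, h2⟩ := case_step l _ "selector" (by decide) (by decide) hend
              rw [h1, h2]; decide
    case _ => obtain ⟨h1, h2⟩ := case_step l _ "xpath" (by decide) (by decide) hend
              rw [h1, h2]; decide
    case _ => obtain ⟨h1, h2⟩ := case_step l _ "selector" (by decide) (by decide) hend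
              rw [h1, h2]; decide
    case _ => obtain ⟨h1, h2⟩ := case_step l _ "css" (by decide) (by decide) hend
              rw [h1, h2]; decide
    case _ => obtain ⟨h1, h2⟩ := case_step l _ "selector" (by decide) (by decide) hend
              rw [h1, h2]; decide
    case _ => obtain ⟨h1, h2⟩ := case_step l _ "selector" (by decide) (by decide) hend
              rw [h1, h2]; decide
    case _ => obtain ⟨h1, h2⟩ := case_step l _ "selector" (by decide) (by decide) hend
              rw [h1, h2]; decide
    case _ => obtain ⟨h1, h2⟩ := case_step l _ "selector" (by decide) (by decide) hend
              rw [h1, h2]; decide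
    case _ => obtain ⟨h1, h2⟩ := case_step l _ "selector" (by decide) (by decide) hend
              rw [h1, h2]; decide
    case _ => obtain ⟨h1, h2⟩ := case_step l _ "selector" (by decide) (by decide) hend
              rw [h1, h2]; decide
    case _ => obtain ⟨h1, h2⟩ := case_step l _ "locator" (by decide) (by decide) hend
              rw [h1, h2]; decide
  · intro h
    rw [Bool.and_eq_true] at h
    obtain ⟨hc, hm⟩ := h
    set r := l.toList.reverse with hr
    set p : Char → Bool := fun c => c ≠ '_' with hp
    have hmem : '_' ∈ r := by simpa using hc
    have hdne : r.dropWhile p ≠ [] := by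
      intro hnil
      have heq : r.takeWhile p = r := by
        have := List.takeWhile_append_dropWhile (p := p) (l := r)
        rw [hnil] at this; simpa using this
      have h2 : '_' ∈ r.takeWhile p := by rw [heq]; exact hmem
      have := List.mem_takeWhile_imp h2
      simp [hp] at this
    obtain ⟨x, xs, hx⟩ := List.exists_cons_of_ne_nil hdne
    have hx' : x = '_' := by
      have h3 := List.head_dropWhile_not p hdne
      have hx2 : (r.dropWhile p).head hdne = x := by
        rw [List.head_eq_iff_head?_eq_some]; simp [hx]
      rw [hx2, hp] at h3
      simpa using h3
    have hsplit : r = r.takeWhile p ++ '_' :: xs := by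
      conv_lhs => rw [← List.takeWhile_append_dropWhile (p := p) (l := r)]
      rw [hx, hx']
    have hsuf : ('_' :: (r.takeWhile p).reverse) <:+ l.toList := by
      refine ⟨xs.reverse, ?_⟩
      have hl : l.toList = r.reverse := by rw [hr, List.reverse_reverse]
      rw [hl]
      conv_rhs => rw [hsplit]
      simp [List.reverse_append]
    refine List.any_eq_true.mpr ⟨String.ofList ((r.takeWhile p).reverse), ?_, ?_⟩
    · simpa using hm
    · rw [PySem.Str.endswith_eq, PySem.Chars.endswith_iff]
      simpa [String.toList_append] using hsuf

-- ===== VERDICT (by name: the statement is the Claim_ definition above) =====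
theorem is_selector_property_spec : Claim_equal_is_selector_property := by
  intro name _
  show is_selector_property name = is_selector_property_alt name
  simp only [is_selector_property, is_selector_property_alt, rpartitionUnderscore]
  by_cases h : selectorPropertyNames.contains (PySem.Str.lower name) = true
  · rw [if_pos h, if_pos h]
  · rw [if_neg h, if_neg h, loop_eq_token]
    split <;> simp_all
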